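-- pv_equiv track=rewrite | github.com/liadraetta/TailNLG-benchmark | Experiments/src/evaluator.py | group_by_language
-- ===== SOURCE A (Python) =====
-- from typing import List, Dict, Any, Optional, Tuple
--
-- def group_by_language(data: List[Dict]) -> Dict[str, List[Dict]]:
--     """
--     Group data by language.
--
--     Args:
--         data: List of dictionaries with 'language' field
--
--     Returns:
--         Dictionary mapping language codes to lists of entries
--     """
--     grouped = {}
--     for entry in data:
--         lang = entry.get('language', 'en')
--         if lang not in grouped:
--             grouped[lang] = []
--         grouped[lang].append(entry)
--
--     return grouped
-- ===== SOURCE B (Python) =====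
-- def group_by_language(data):
--     """Group data by language: first collect the distinct language keys in
--     first-occurrence order, then build each group with one filtering pass."""
--     keys = []
--     for entry in data:
--         lang = entry.get('language', 'en')
--         if lang not in keys:
--             keys.append(lang)
--     return {k: [e for e in data if e.get('language', 'en') == k] for k in keys}
-- ===== Notes on version B (the rewrite author's own statement) =====
-- stated objective: alternative
-- what changed: B replaces A's single-pass dict accumulation (create-bucket-then-append per entry) by a two-phase scheme: one pass collecting the distinct language keys in first-occurrence order, then one filtering comprehension per key to build its group.
import Mathlib
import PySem

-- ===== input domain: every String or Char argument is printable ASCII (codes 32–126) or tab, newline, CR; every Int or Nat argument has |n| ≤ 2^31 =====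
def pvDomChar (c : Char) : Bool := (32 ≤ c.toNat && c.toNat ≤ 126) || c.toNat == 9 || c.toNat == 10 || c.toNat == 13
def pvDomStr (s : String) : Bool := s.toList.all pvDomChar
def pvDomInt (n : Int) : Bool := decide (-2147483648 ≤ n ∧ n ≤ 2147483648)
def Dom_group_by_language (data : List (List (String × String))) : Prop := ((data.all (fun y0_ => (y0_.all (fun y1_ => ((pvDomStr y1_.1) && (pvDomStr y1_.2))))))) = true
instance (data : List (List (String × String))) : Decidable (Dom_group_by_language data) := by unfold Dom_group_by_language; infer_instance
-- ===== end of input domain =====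

-- B groups by a two-phase scheme (collect distinct keys, then filter per key) instead of
-- A's single-pass dict accumulation; same result, no speed claim (objective: alternative).

-- ===== PORT A =====
-- entry.get('language', 'en') on an entry given as an association list
def pvLangKey (entry : List (String × String)) : String :=
  (PySem.Dict.mk entry).getD "language" "en"

def group_by_language (data : List (List (String × String))) : List (String × List (List (String × String))) :=
  (data.foldl
    (fun grouped entry =>
      let lang := pvLangKey entry
      let grouped := if grouped.contains lang then grouped else grouped.insert lang []
      -- grouped[lang].append(entry)
      grouped.modify lang [] (fun l => l ++ [entry]))
    PySem.Dict.empty).items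

-- ===== PORT B =====
def group_by_language_alt (data : List (List (String × String))) : List (String × List (List (String × String))) :=
  -- pass 1: distinct language keys in first-occurrence order ('if lang not in keys: keys.append(lang)')
  let keys : PySem.Set String :=
    data.foldl (fun ks entry => ks.add (pvLangKey entry)) []
  -- pass 2: dict comprehension {k: [e for e in data if e.get('language','en') == k] for k in keys}
  (keys.foldl
    (fun d k => d.insert k (data.filter (fun e => pvLangKey e == k)))
    PySem.Dict.empty).items

-- ===== PRECONDITION & SPEC =====
def Spec_group_by_language (data : List (List (String × String))) (out : List (String × List (List (String × String)))) : Prop := out = group_by_language_alt data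
instance (data : List (List (String × String))) (out : List (String × List (List (String × String)))) : Decidable (Spec_group_by_language data out) := by unfold Spec_group_by_language; infer_instance

-- ===== CLAIM (what is proved, stated in full; the proofs are below) =====
def Claim_equal_group_by_language : Prop := ∀ (data : List (List (String × String))), Dom_group_by_language data → Spec_group_by_language data (group_by_language data)

-- ===== LEMMAS AND PROOFS =====

-- A's loop body (create-empty-bucket-then-append) is exactly one 'modify' of the bucket.
theorem pvStep_eq_modify (g : PySem.Dict String (List (List (String × String)))) (e : List (String × String)) :
    (let lang := pvLangKey e
     let g' := if g.contains lang then g else g.insert lang []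
     g'.modify lang [] (fun l => l ++ [e]))
    = g.modify (pvLangKey e) [] (fun l => l ++ [e]) := by
  by_cases h : g.contains (pvLangKey e)
  · simp [h]
  · simp only [h, if_false, Bool.false_eq_true]
    simp only [PySem.Dict.modify, PySem.Dict.getD_insert_self, PySem.Dict.insert_insert_self,
      PySem.Dict.getD_of_not_contains _ _ (by simpa using h)]

-- A's fold, rewritten as the canonical grouping fold over (key, entry) pairs.
theorem pvAfold_eq (data : List (List (String × String))) :
    data.foldl
      (fun grouped entry =>
        let lang := pvLangKey entry
        let grouped := if grouped.contains lang then grouped else grouped.insert lang []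
        grouped.modify lang [] (fun l => l ++ [entry]))
      PySem.Dict.empty
    = data.foldl (fun d e => d.modify (pvLangKey e) [] (fun l => l ++ [e])) PySem.Dict.empty := by
  exact PySem.List.foldl_congr_mem data _ _ _ (fun g e _ => pvStep_eq_modify g e)

theorem pvKeys_eq (data : List (List (String × String))) :
    (data.foldl (fun d e => d.modify (pvLangKey e) [] (fun l => l ++ [e])) PySem.Dict.empty).keys
    = PySem.Set.ofList (data.map pvLangKey) := by
  rw [PySem.Dict.keys_foldl_modify_key data pvLangKey [] (fun _ e l => l ++ [e])]
  simp [PySem.Dict.empty, PySem.Dict.keys, PySem.Set.update_nil_left]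

theorem pvGetD_eq (data : List (List (String × String))) (k : String) :
    (data.foldl (fun d e => d.modify (pvLangKey e) [] (fun l => l ++ [e])) PySem.Dict.empty).getD k []
    = data.filter (fun e => pvLangKey e == k) := by
  have h : data.foldl (fun d e => d.modify (pvLangKey e) [] (fun l => l ++ [e])) PySem.Dict.empty
      = (data.map (fun e => (pvLangKey e, e))).foldl
          (fun d p => d.modify p.1 [] (fun l => l ++ [p.2])) PySem.Dict.empty := by
    rw [List.foldl_map]
  rw [h, PySem.Dict.getD_foldl_modify_append]
  simp [List.filter_map, Function.comp_def, List.map_map, PySem.Dict.getD_empty]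

theorem group_by_language_eq (data : List (List (String × String))) :
    group_by_language data = group_by_language_alt data := by
  unfold group_by_language group_by_language_alt
  rw [pvAfold_eq]
  set K := PySem.Set.ofList (data.map pvLangKey) with hK
  have hnodup : K.Nodup := PySem.Set.nodup_ofList _
  -- A side: items = K.map (k ↦ (k, bucket k))
  have hA : (data.foldl (fun d e => d.modify (pvLangKey e) [] (fun l => l ++ [e]))
      PySem.Dict.empty).items
      = K.map (fun k => (k, data.filter (fun e => pvLangKey e == k))) := by
    rw [PySem.Dict.items_eq_map_keys _ (by rw [pvKeys_eq]; exact hnodup) []]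
    rw [pvKeys_eq]
    exact List.map_congr_left (fun k _ => by rw [pvGetD_eq])
  -- B side: the insert fold over the (fresh, distinct) keys appends exactly the same pairs
  have hBkeys : data.foldl (fun ks e => PySem.Set.add ks (pvLangKey e)) ([] : PySem.Set String) = K := by
    rw [← PySem.Set.update_map_eq_foldl_add, PySem.Set.update_nil_left]
  have hB : (K.foldl (fun d k => d.insert k (data.filter (fun e => pvLangKey e == k)))
      PySem.Dict.empty).items
      = K.map (fun k => (k, data.filter (fun e => pvLangKey e == k))) := by
    have := PySem.Dict.items_foldl_insert_fresh K (fun k => k)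
      (fun k => data.filter (fun e => pvLangKey e == k)) PySem.Dict.empty
      (fun a _ => PySem.Dict.contains_empty a) (by simpa using hnodup)
    simpa [PySem.Dict.empty, PySem.Dict.items] using this
  rw [hA, hBkeys, hB]

-- ===== VERDICT (by name: the statement is the Claim_ definition above) =====
theorem group_by_language_spec : Claim_equal_group_by_language := by
  intro data _
  unfold Spec_group_by_language
  exact group_by_language_eq data
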